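-- pv_equiv track=rewrite | github.com/Madeeha-Anjum/puzzling-problems | CodeWars/7KYU/Printer_Errors.py | printer_error2
-- ===== SOURCE A (Python) =====
-- from functools import reduce
--
-- def printer_error2(s):
--     lst = list(map(lambda x: ord(x), s))
--     dic = {}
--     for num in lst:
--         if num in dic:
--             dic[num] = dic[num] + 1
--         else:
--             dic[num] = 1
--     return (
--         str(
--             reduce(
--                 lambda acc, item: acc + item[1] if item[0] >= 110 else acc,
--                 dic.items(),
--                 0,
--             )
--         )
--         + "/"
--         + str(len(s))
--     )
-- ===== SOURCE B (Python) =====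
-- def printer_error2(s):
--     count = sum(1 for c in s if ord(c) >= 110)
--     return str(count) + "/" + str(len(s))
-- ===== Notes on version B (the rewrite author's own statement) =====
-- stated objective: simpler
-- what changed: Replaces the build-a-frequency-dict-then-reduce-over-items pipeline with a single pass that keeps one integer counter of characters with ord >= 110.
import Mathlib
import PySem

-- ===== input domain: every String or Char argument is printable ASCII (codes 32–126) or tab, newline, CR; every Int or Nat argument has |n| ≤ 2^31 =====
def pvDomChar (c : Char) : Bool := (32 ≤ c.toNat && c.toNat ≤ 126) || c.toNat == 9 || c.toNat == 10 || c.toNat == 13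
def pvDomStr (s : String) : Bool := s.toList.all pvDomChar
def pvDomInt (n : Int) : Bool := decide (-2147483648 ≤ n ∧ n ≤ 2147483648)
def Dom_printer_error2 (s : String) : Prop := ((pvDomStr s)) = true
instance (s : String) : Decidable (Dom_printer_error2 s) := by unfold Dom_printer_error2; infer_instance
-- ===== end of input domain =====

-- B drops A's frequency dict + reduce-over-items and keeps a single counter in one pass (objective: simpler).

-- ===== PORT A =====
def printer_error2 (s : String) : String :=
  let lst : List Int := s.toList.map (fun x => (x.toNat : Int))
  let dic : PySem.Dict Int Int := lst.foldl
    (fun d num => if d.contains num then d.insert num (d.getD num 0 + 1) else d.insert num 1)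
    PySem.Dict.empty
  PySem.Int.toStr (dic.items.foldl (fun acc item => if item.1 ≥ 110 then acc + item.2 else acc) 0)
    ++ "/" ++ PySem.Int.toStr (PySem.Str.len s)

-- ===== PORT B =====
def printer_error2_alt (s : String) : String :=
  let count : Int := s.toList.foldl (fun acc c => if c.toNat ≥ 110 then acc + 1 else acc) 0
  PySem.Int.toStr count ++ "/" ++ PySem.Int.toStr (PySem.Str.len s)

-- ===== PRECONDITION & SPEC =====
def Spec_printer_error2 (s : String) (out : String) : Prop := out = printer_error2_alt s
instance (s : String) (out : String) : Decidable (Spec_printer_error2 s out) := by unfold Spec_printer_error2; infer_instance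

-- ===== CLAIM (what is proved, stated in full; the proofs are below) =====
def Claim_equal_printer_error2 : Prop := ∀ (s : String), Dom_printer_error2 s → Spec_printer_error2 s (printer_error2 s)

-- ===== LEMMAS AND PROOFS =====

-- A's loop body equals the canonical counting step, pointwise.
lemma pvStepEq (d : PySem.Dict Int Int) (num : Int) :
    (if d.contains num then d.insert num (d.getD num 0 + 1) else d.insert num 1)
      = d.insert num (d.getD num 0 + 1) := by
  by_cases h : d.contains num = true
  · simp [h]
  · have h' : d.contains num = false := by simpa using h
    rw [if_neg (by simp [h']), PySem.Dict.getD_of_not_contains d 0 h']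
    norm_num

-- pushing an if through map/sum: sum of (if p then g else 0) = sum of g over the filter
lemma pvSumIf {α : Type} (l : List α) (p : α → Prop) [DecidablePred p] (g : α → Int) :
    (l.map (fun x => if p x then g x else 0)).sum
      = ((l.filter (fun x => decide (p x))).map g).sum := by
  induction l with
  | nil => simp
  | cons x t ih =>
    by_cases h : p x
    · simp [h, ih]
    · simp [h, ih]

-- PySem's first-occurrence dedup is a permutation of Mathlib's dedup
lemma pvDedupPerm (l : List Int) : (PySem.List.dedup l).Perm l.dedup := by
  rw [List.perm_ext_iff_of_nodup (PySem.List.nodup_dedup l) l.nodup_dedup]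
  intro a
  rw [PySem.List.mem_dedup, List.mem_dedup]

-- the sum over the distinct keys of the filtered counts is the filtered length
lemma pvKeySum (l : List Int) :
    ((PySem.Set.ofList l).map (fun k => if k ≥ 110 then (l.count k : Int) else 0)).sum
      = (l.countP (fun x => decide (x ≥ 110)) : Int) := by
  have hperm : (PySem.Set.ofList l : List Int).Perm l.dedup := by
    simpa [PySem.List.dedup_eq_ofList] using pvDedupPerm l
  calc ((PySem.Set.ofList l).map (fun k => if k ≥ 110 then (l.count k : Int) else 0)).sum
      = (l.dedup.map (fun k => if k ≥ 110 then (l.count k : Int) else 0)).sum :=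
        (hperm.map _).sum_eq
    _ = ((l.dedup.filter (fun k => decide (k ≥ 110))).map (fun k => (l.count k : Int))).sum :=
        pvSumIf _ _ _
    _ = (((l.dedup.filter (fun k => decide (k ≥ 110))).map (fun k => l.count k)).sum : Int) := by
        rw [Nat.cast_list_sum, List.map_map]; rfl
    _ = (l.countP (fun x => decide (x ≥ 110)) : Int) := by
        rw [List.sum_map_count_dedup_filter_eq_countP]

-- the two integer numerators agree
lemma pvCountEq (s : String) :
    List.foldl (fun (acc : Int) (item : Int × Int) => if item.1 ≥ 110 then acc + item.2 else acc) 0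
        ((s.toList.map (fun x => (x.toNat : Int))).foldl
          (fun d num => if d.contains num then d.insert num (d.getD num 0 + 1) else d.insert num 1)
          PySem.Dict.empty).items
      = s.toList.foldl (fun acc c => if c.toNat ≥ 110 then acc + 1 else acc) 0 := by
  set l : List Int := s.toList.map (fun x => (x.toNat : Int)) with hl
  have hdic : l.foldl
      (fun d num => if d.contains num then d.insert num (d.getD num 0 + 1) else d.insert num 1)
      PySem.Dict.empty = PySem.Dict.counter l := by
    rw [PySem.List.foldl_congr_mem l _ (fun d num => d.insert num (d.getD num 0 + 1)) _
        (fun acc x _ => pvStepEq acc x)]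
    exact PySem.Dict.foldl_insert_getD_add_one_eq_counter l
  rw [hdic, PySem.Dict.items_counter]
  rw [PySem.List.foldl_congr_mem _ _ (fun (acc : Int) (item : Int × Int) =>
        acc + (if item.1 ≥ 110 then item.2 else 0)) _
        (by intro acc x _; by_cases h : x.1 ≥ 110 <;> simp [h])]
  rw [PySem.List.foldl_add, List.map_map]
  have hcomp : ((fun item : Int × Int => if item.1 ≥ 110 then item.2 else 0) ∘
      fun k => (k, (l.count k : Int))) = fun k => if k ≥ 110 then (l.count k : Int) else 0 := rfl
  rw [hcomp, pvKeySum l]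
  rw [PySem.List.foldl_ite_add_one (fun c : Char => c.toNat ≥ 110)]
  rw [hl, List.countP_map]
  norm_num
  apply List.countP_congr
  intro c _
  simp

-- ===== VERDICT (by name: the statement is the Claim_ definition above) =====
theorem printer_error2_spec : Claim_equal_printer_error2 := by
  intro s _
  unfold Spec_printer_error2 printer_error2 printer_error2_alt
  simp only [pvCountEq s]
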